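-- pv_equiv track=rewrite | github.com/georgelucian01/Python | w3resources/problem_1.py | check_list
-- ===== SOURCE A (Python) =====
-- def check_list(nums):
--
--     count19 = 0
--     count5 = 0
--
--     for num in nums:
--         if num == 19:
--             count19 += 1
--         if num == 5:
--             count5 += 1
--
--     if count19 == 2 and count5 >= 3:
--         return True
--
--     return False
-- ===== SOURCE B (Python) =====
-- def check_list(nums):
--     def upto_three(target):
--         # scan lazily, stop as soon as a third match is found
--         found = []
--         for x in nums:
--             if x == target:
--                 found.append(x)
--                 if len(found) == 3:
--                     break
--         return len(found)
--     return upto_three(19) == 2 and upto_three(5) == 3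
-- ===== Notes on version B (the rewrite author's own statement) =====
-- stated objective: alternative
-- what changed: B replaces A's single full pass with two dual running counters by two staged early-exit scans: each scan collects matches of one target and stops as soon as a third match appears, then the capped match counts are compared to 2 and 3.
import Mathlib
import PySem

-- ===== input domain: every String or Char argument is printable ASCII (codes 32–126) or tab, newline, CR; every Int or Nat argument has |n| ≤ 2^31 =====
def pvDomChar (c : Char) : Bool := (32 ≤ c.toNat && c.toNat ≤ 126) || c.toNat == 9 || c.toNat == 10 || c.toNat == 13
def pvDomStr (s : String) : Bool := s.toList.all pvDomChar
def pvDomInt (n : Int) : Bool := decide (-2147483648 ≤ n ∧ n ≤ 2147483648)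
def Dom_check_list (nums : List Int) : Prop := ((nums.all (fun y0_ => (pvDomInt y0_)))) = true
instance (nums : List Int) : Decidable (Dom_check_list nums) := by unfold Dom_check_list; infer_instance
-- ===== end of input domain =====

-- B replaces A's single pass holding two running counters by two staged early-exit scans,
-- each collecting at most three matches of one target (alternative decomposition, same O(n) cost).

-- ===== PORT A =====
def check_list (nums : List Int) : Bool :=
  let cs := nums.foldl (fun (c : Int × Int) num =>
    let c19 := if num == 19 then c.1 + 1 else c.1
    let c5 := if num == 5 then c.2 + 1 else c.2
    (c19, c5)) (0, 0)
  if cs.1 == 2 && cs.2 ≥ 3 then true else false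

-- ===== PORT B =====
-- B's helper: walk the list, collect matches of `target`, break once a third is found.
def pvUptoThree (target : Int) : List Int → List Int → List Int
  | found, [] => found
  | found, x :: xs =>
    if x == target then
      let found' := found ++ [x]
      if found'.length == 3 then found' else pvUptoThree target found' xs
    else pvUptoThree target found xs

def check_list_alt (nums : List Int) : Bool :=
  (pvUptoThree 19 [] nums).length == 2 && (pvUptoThree 5 [] nums).length == 3

-- ===== PRECONDITION & SPEC =====
def Spec_check_list (nums : List Int) (out : Bool) : Prop := out = check_list_alt nums
instance (nums : List Int) (out : Bool) : Decidable (Spec_check_list nums out) := by unfold Spec_check_list; infer_instance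

-- ===== CLAIM (what is proved, stated in full; the proofs are below) =====
def Claim_equal_check_list : Prop := ∀ (nums : List Int), Dom_check_list nums → Spec_check_list nums (check_list nums)

-- ===== LEMMAS AND PROOFS =====
lemma check_list_fold_counts (nums : List Int) (a b : Int) :
    nums.foldl (fun (c : Int × Int) num =>
      let c19 := if num == 19 then c.1 + 1 else c.1
      let c5 := if num == 5 then c.2 + 1 else c.2
      (c19, c5)) (a, b)
    = (a + nums.countP (· == 19), b + nums.countP (· == 5)) := by
  induction nums generalizing a b with
  | nil => simp
  | cons x xs ih =>
    simp only [List.foldl_cons, List.countP_cons, ih]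
    by_cases h19 : x = 19 <;> by_cases h5 : x = 5 <;>
      simp [h19, h5] <;> push_cast <;> ring

lemma pvUptoThree_length (target : Int) (nums found : List Int)
    (h : found.length < 3) :
    (pvUptoThree target found nums).length = min 3 (found.length + nums.countP (· == target)) := by
  induction nums generalizing found with
  | nil => simp [pvUptoThree]; omega
  | cons x xs ih =>
    simp only [pvUptoThree, List.countP_cons]
    by_cases hx : x = target
    · simp only [hx, beq_self_eq_true, if_true]
      by_cases h3 : (found ++ [target]).length = 3
      · rw [if_pos (by simpa using h3)]
        simp only [List.length_append, List.length_cons, List.length_nil] at h3 ⊢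
        have := List.countP_le_length (p := (· == target)) (l := xs)
        omega
      · rw [if_neg (by simpa using h3)]
        rw [ih _ (by simp at h3 ⊢; omega)]
        simp only [List.length_append, List.length_cons, List.length_nil]
        omega
    · simp only [beq_iff_eq, hx, if_false]
      rw [ih _ h]
      simp [hx]

-- ===== VERDICT (by name: the statement is the Claim_ definition above) =====
theorem check_list_spec : Claim_equal_check_list := by
  intro nums _
  unfold Spec_check_list check_list check_list_alt
  rw [check_list_fold_counts, pvUptoThree_length 19 nums [] (by simp),
    pvUptoThree_length 5 nums [] (by simp)]
  simp only [zero_add, List.length_nil, Nat.zero_add]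
  set m := nums.countP (· == 19) with hm
  set n := nums.countP (· == 5) with hn
  by_cases h2 : m = 2 <;> by_cases h3 : 3 ≤ n
  · have e1 : min 3 m = 2 := by omega
    have e2 : min 3 n = 3 := by omega
    simp [e1, e2, h2, h3]
  · have e2 : min 3 n ≠ 3 := by omega
    have : ¬ ((3:Int) ≤ (n:Int)) := by exact_mod_cast (by omega : ¬ (3 ≤ n))
    simp [e2, this]
  · have e1 : min 3 m ≠ 2 := by omega
    have : ((m:Int) ≠ 2) := by exact_mod_cast h2
    simp [e1, this]
  · have e1 : min 3 m ≠ 2 := by omega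
    have : ((m:Int) ≠ 2) := by exact_mod_cast h2
    simp [e1, this]
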